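-- pv_equiv track=rewrite | github.com/jaycosaur/advent-of-code-2023 | day_1/b.py | scan_line_for_matches
-- ===== SOURCE A (Python) =====
-- def scan_line_for_matches(line: str, lookup_dict: dict):
--     line_clone = line
--     first_number = None
--     while len(line_clone) > 0:
--         first_char = line_clone[0]
--
--         is_number = first_char.isnumeric()
--
--         if is_number:
--             return first_char
--
--         for k, v in lookup_dict.items():
--             match = line_clone.find(k, 0)
--             if match == 0:
--                 return v
--
--         line_clone = line_clone[1:]
--
--     return first_number
-- ===== SOURCE B (Python) =====
-- def scan_line_for_matches(line: str, lookup_dict: dict):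
--     for i in range(len(line)):
--         ch = line[i]
--         if ch.isnumeric():
--             return ch
--         for k, v in lookup_dict.items():
--             if line.startswith(k, i):
--                 return v
--     return None
-- ===== Notes on version B (the rewrite author's own statement) =====
-- stated objective: faster
-- what changed: Replaces the while-loop that repeatedly slices the string and calls find (which scans the whole remaining suffix for each key) with a single index pointer and startswith(k, i) prefix checks, so no suffix copies and no full-suffix scans.
import Mathlib
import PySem

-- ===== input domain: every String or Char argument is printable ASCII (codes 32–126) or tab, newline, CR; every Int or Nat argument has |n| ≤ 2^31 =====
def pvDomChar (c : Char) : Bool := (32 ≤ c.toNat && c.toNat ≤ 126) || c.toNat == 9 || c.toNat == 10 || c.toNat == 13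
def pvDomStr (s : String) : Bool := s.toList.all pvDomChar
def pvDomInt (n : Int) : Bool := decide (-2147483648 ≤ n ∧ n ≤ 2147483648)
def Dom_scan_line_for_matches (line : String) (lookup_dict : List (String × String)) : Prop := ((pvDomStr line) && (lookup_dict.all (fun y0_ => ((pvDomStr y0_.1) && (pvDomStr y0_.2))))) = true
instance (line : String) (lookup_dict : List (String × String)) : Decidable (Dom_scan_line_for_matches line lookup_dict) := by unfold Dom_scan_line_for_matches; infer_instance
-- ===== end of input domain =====

-- B replaces A's repeated suffix-slicing + full-suffix find() with an index pointer and
-- prefix checks at that index (faster: asymptotic, in a timing run).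


-- ===== PORT A =====
-- the inner 'for k, v in lookup_dict.items(): if line_clone.find(k, 0) == 0: return v'
def pvScanDictA (cl : List Char) : List (String × String) → Option String
  | [] => none
  | (k, v) :: rest =>
      if PySem.Chars.find cl k.toList = 0 then some v else pvScanDictA cl rest

-- the while loop over line_clone (= successive suffixes of line); first_char.isnumeric()
-- is ported as Chars.isdigit, exact on the printable-ASCII domain
def pvScanA (lookup_dict : List (String × String)) : List Char → Option String
  | [] => none
  | c :: rest =>
      if PySem.Chars.isdigit c then some (String.ofList [c])
      else
        match pvScanDictA (c :: rest) lookup_dict with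
        | some v => some v
        | none => pvScanA lookup_dict rest

def scan_line_for_matches (line : String) (lookup_dict : List (String × String)) : Option String :=
  pvScanA lookup_dict line.toList

-- ===== PORT B =====
-- 'if line.startswith(k, i): return v' — startswith(k, i) with 0 ≤ i ≤ len(line) is exactly
-- the prefix check on the suffix starting at i
def pvScanDictB (cl : List Char) (i : Nat) : List (String × String) → Option String
  | [] => none
  | (k, v) :: rest =>
      if PySem.Chars.startswith (cl.drop i) k.toList then some v else pvScanDictB cl i rest

-- 'for i in range(len(line))' with early returns; ch.isnumeric() as Chars.isdigit (ASCII domain)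
def pvScanB (cl : List Char) (lookup_dict : List (String × String)) (i : Nat) : Option String :=
  if h : i < cl.length then
    let ch := cl[i]
    if PySem.Chars.isdigit ch then some (String.ofList [ch])
    else
      match pvScanDictB cl i lookup_dict with
      | some v => some v
      | none => pvScanB cl lookup_dict (i + 1)
  else none
termination_by cl.length - i

def scan_line_for_matches_alt (line : String) (lookup_dict : List (String × String)) : Option String :=
  pvScanB line.toList lookup_dict 0

-- ===== PRECONDITION & SPEC =====
def Spec_scan_line_for_matches (line : String) (lookup_dict : List (String × String)) (out : Option String) : Prop := out = scan_line_for_matches_alt line lookup_dict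
instance (line : String) (lookup_dict : List (String × String)) (out : Option String) : Decidable (Spec_scan_line_for_matches line lookup_dict out) := by unfold Spec_scan_line_for_matches; infer_instance

-- ===== CLAIM (what is proved, stated in full; the proofs are below) =====
def Claim_equal_scan_line_for_matches : Prop := ∀ (line : String) (lookup_dict : List (String × String)), Dom_scan_line_for_matches line lookup_dict → Spec_scan_line_for_matches line lookup_dict (scan_line_for_matches line lookup_dict)

-- ===== LEMMAS AND PROOFS =====
theorem pv_find_eq_zero_iff (s k : List Char) :
    PySem.Chars.find s k = 0 ↔ PySem.Chars.startswith s k = true := by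
  rw [PySem.Chars.startswith_iff]
  constructor
  · intro h
    have h0 : 0 ≤ PySem.Chars.find s k := by omega
    have := (PySem.Chars.find_spec h0).1
    simpa [h] using this
  · intro hpre
    have h0 : 0 ≤ PySem.Chars.find s k :=
      (PySem.Chars.find_nonneg_iff s k).mpr hpre.isInfix
    rcases PySem.Chars.find_spec h0 with ⟨_, hmin⟩
    by_contra hne
    have hpos : 0 < (PySem.Chars.find s k).toNat := by omega
    exact hmin 0 hpos (by simpa using hpre)

theorem pv_dict_eq (cl : List Char) (i : Nat) (d : List (String × String)) :
    pvScanDictA (cl.drop i) d = pvScanDictB cl i d := by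
  induction d with
  | nil => rfl
  | cons kv rest ih =>
      obtain ⟨k, v⟩ := kv
      simp only [pvScanDictA, pvScanDictB, ih]
      by_cases h : PySem.Chars.find (cl.drop i) k.toList = 0
      · rw [if_pos h, if_pos ((pv_find_eq_zero_iff _ _).mp h)]
      · rw [if_neg h, if_neg (fun hs => h ((pv_find_eq_zero_iff _ _).mpr hs))]

theorem pv_scan_eq (cl : List Char) (d : List (String × String)) :
    ∀ i, pvScanA d (cl.drop i) = pvScanB cl d i := by
  intro i
  induction hn : cl.length - i using Nat.strong_induction_on generalizing i with
  | _ n ih =>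
    by_cases h : i < cl.length
    · have hdrop : cl.drop i = cl[i] :: cl.drop (i + 1) := List.drop_eq_getElem_cons h
      rw [pvScanB]
      simp only [dif_pos h]
      rw [hdrop, pvScanA, ← hdrop]
      have hd := pv_dict_eq cl i d
      by_cases hdig : PySem.Chars.isdigit cl[i] = true
      · simp [hdig]
      · simp only [hdig, Bool.false_eq_true, if_false]
        rw [hd]
        cases hm : pvScanDictB cl i d with
        | some v => simp
        | none =>
            simp only []
            exact ih (cl.length - (i+1)) (by omega) (i+1) rfl
    · rw [pvScanB]
      simp [dif_neg h, List.drop_eq_nil_of_le (by omega : cl.length ≤ i), pvScanA]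

-- ===== VERDICT (by name: the statement is the Claim_ definition above) =====
theorem scan_line_for_matches_spec : Claim_equal_scan_line_for_matches := by
  intro line d _
  show scan_line_for_matches line d = scan_line_for_matches_alt line d
  unfold scan_line_for_matches scan_line_for_matches_alt
  simpa using pv_scan_eq line.toList d 0
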